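-- pv_equiv track=rewrite | github.com/Joohee97124/CodingTest | 프로그래머스/0/181887. 홀수 vs 짝수/홀수 vs 짝수.py | solution
-- ===== SOURCE A (Python) =====
-- def solution(num_list):
--     tmp1 = 0 #홀수
--     tmp2 = 0 #짝수
--
--     for i,num in enumerate(num_list):
--         if i%2==0:
--             tmp1 += num
--         else:
--             tmp2 += num
--
--     return max(tmp1, tmp2)
-- ===== SOURCE B (Python) =====
-- def solution(num_list):
--     return max(sum(num_list[0::2]), sum(num_list[1::2]))
-- ===== Notes on version B (the rewrite author's own statement) =====
-- stated objective: idiomatic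
-- what changed: Replaces the single index-parity branched loop over enumerate with two strided slices num_list[0::2] and num_list[1::2] summed by the built-in sum and compared with max.
import Mathlib
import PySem

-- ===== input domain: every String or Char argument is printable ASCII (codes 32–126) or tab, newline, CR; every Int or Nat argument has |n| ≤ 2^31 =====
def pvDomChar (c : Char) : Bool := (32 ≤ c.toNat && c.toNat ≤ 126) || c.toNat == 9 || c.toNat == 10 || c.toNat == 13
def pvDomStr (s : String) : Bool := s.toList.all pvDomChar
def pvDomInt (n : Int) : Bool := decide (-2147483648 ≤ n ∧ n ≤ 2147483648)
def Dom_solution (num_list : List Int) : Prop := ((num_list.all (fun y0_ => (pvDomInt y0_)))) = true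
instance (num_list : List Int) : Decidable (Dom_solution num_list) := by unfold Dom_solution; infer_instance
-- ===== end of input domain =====

-- B replaces A's single index-parity branched loop by summing the two strided slices
-- num_list[0::2] and num_list[1::2]; idiomatic, same cost.

-- ===== PORT A =====
-- one loop over enumerate(num_list), branching on index parity
def solution (num_list : List Int) : Int :=
  let r := (PySem.List.enumerate num_list 0).foldl
    (fun (t : Int × Int) (p : Int × Int) =>
      if PySem.Int.mod p.1 2 == 0 then (t.1 + p.2, t.2) else (t.1, t.2 + p.2))
    ((0 : Int), (0 : Int))
  max r.1 r.2

-- ===== PORT B =====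
-- num_list[0::2] / num_list[1::2] via PySem.List.slice?; step 2 ≠ 0 so the slice
-- always returns (getD [] is only a totality guard)
def solution_alt (num_list : List Int) : Int :=
  max ((PySem.List.slice? num_list (some 0) none 2).getD []).sum
      ((PySem.List.slice? num_list (some 1) none 2).getD []).sum

-- ===== PRECONDITION & SPEC =====
def Spec_solution (num_list : List Int) (out : Int) : Prop := out = solution_alt num_list
instance (num_list : List Int) (out : Int) : Decidable (Spec_solution num_list out) := by unfold Spec_solution; infer_instance

-- ===== CLAIM (what is proved, stated in full; the proofs are below) =====
def Claim_equal_solution : Prop := ∀ (num_list : List Int), Dom_solution num_list → Spec_solution num_list (solution num_list)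

-- ===== LEMMAS AND PROOFS =====

/-- every other element, starting with the first -/
def everyOther : List Int → List Int
  | [] => []
  | [x] => [x]
  | x :: _ :: t => x :: everyOther t

lemma everyOther_cons (x : Int) (t : List Int) :
    everyOther (x :: t) = x :: everyOther (t.drop 1) := by
  cases t <;> simp [everyOther]

/-- a strided filterMap over a long enough range is everyOther -/
lemma filterMap_range_eq_everyOther :
    ∀ (c : Nat) (ys : List Int), ys.length ≤ 2 * c →
      (List.range c).filterMap (fun k => ys[2 * k]?) = everyOther ys := by
  intro c
  induction c with
  | zero =>
      intro ys h
      have : ys = [] := List.eq_nil_of_length_eq_zero (by omega)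
      subst this; simp [everyOther]
  | succ n ih =>
      intro ys h
      rw [List.range_succ_eq_map]
      cases ys with
      | nil =>
          simp [everyOther]
      | cons x t =>
          have hcomp : ((fun k => (x :: t)[2 * k]?) ∘ (· + 1)) = fun k => (t.drop 1)[2 * k]? := by
            funext k
            rw [Function.comp_apply, List.getElem?_drop]
            have h2 : 2 * (k + 1) = (1 + 2 * k) + 1 := by omega
            simp [h2]
          have hlen : (t.drop 1).length ≤ 2 * n := by
            rw [List.length_drop]
            simp at h
            omega
          simp only [List.filterMap_cons, List.filterMap_map, hcomp]
          rw [ih _ hlen, everyOther_cons]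
          simp

lemma slice_even (xs : List Int) :
    PySem.List.slice? xs (some 0) none 2 = some (everyOther xs) := by
  simp only [PySem.List.slice?, PySem.List.sliceIndices]
  norm_num
  have harg : (fun (k : Nat) => xs[(2 * (k : Int)).toNat]?) = fun k => xs[2 * k]? := by
    funext k
    have h2 : (2 * (k : Int)).toNat = 2 * k := by omega
    rw [h2]
  by_cases h0 : 0 < xs.length
  · rw [if_pos (by exact_mod_cast h0), harg]
    apply filterMap_range_eq_everyOther
    omega
  · have : xs = [] := List.eq_nil_of_length_eq_zero (by omega)
    subst this
    simp [everyOther]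

lemma slice_odd (xs : List Int) :
    PySem.List.slice? xs (some 1) none 2 = some (everyOther (xs.drop 1)) := by
  simp only [PySem.List.slice?, PySem.List.sliceIndices]
  norm_num
  rw [← List.drop_one]
  by_cases h0 : 2 ≤ xs.length
  · have hmin : min (1 : Int) (xs.length : Int) = 1 := by omega
    rw [hmin, if_pos (by omega)]
    have harg : (fun (k : Nat) => xs[(1 + 2 * (k : Int)).toNat]?) = fun k => (xs.drop 1)[2 * k]? := by
      funext k
      rw [List.getElem?_drop]
      have h2 : (1 + 2 * (k : Int)).toNat = 1 + 2 * k := by omega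
      rw [h2]
    rw [harg]
    apply filterMap_range_eq_everyOther
    rw [List.length_drop]
    omega
  · have hd : xs.drop 1 = [] := List.eq_nil_of_length_eq_zero (by rw [List.length_drop]; omega)
    rw [hd, if_neg (by omega)]
    simp [everyOther]

/-- A's loop from an arbitrary nonnegative start index and accumulators -/
lemma foldA (xs : List Int) : ∀ (i a b : Int), 0 ≤ i →
    (PySem.List.enumerate xs i).foldl
      (fun (t : Int × Int) (p : Int × Int) =>
        if PySem.Int.mod p.1 2 == 0 then (t.1 + p.2, t.2) else (t.1, t.2 + p.2))
      (a, b)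
    = if i % 2 = 0 then (a + (everyOther xs).sum, b + (everyOther (xs.drop 1)).sum)
      else (a + (everyOther (xs.drop 1)).sum, b + (everyOther xs).sum) := by
  induction xs with
  | nil =>
      intro i a b _
      simp [PySem.List.enumerate_nil, everyOther]
  | cons x t ih =>
      intro i a b hi
      rw [PySem.List.enumerate_cons, List.foldl_cons]
      have hmod : PySem.Int.mod i 2 = i % 2 := by
        simp [PySem.Int.mod, Int.fmod_eq_emod]
      simp only [beq_iff_eq] at ih ⊢
      simp only [hmod]
      by_cases h : i % 2 = 0
      · rw [if_pos h, ih (i + 1) (a + x) b (by omega), if_neg (by omega), if_pos h]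
        simp [everyOther_cons, add_assoc]
      · rw [if_neg h, ih (i + 1) a (b + x) (by omega), if_pos (by omega), if_neg h]
        simp [everyOther_cons, add_assoc]

-- ===== VERDICT (by name: the statement is the Claim_ definition above) =====
theorem solution_spec : Claim_equal_solution := by
  intro xs _
  unfold Spec_solution solution solution_alt
  rw [slice_even, slice_odd, foldA xs 0 0 0 (by omega)]
  norm_num
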